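-- pv_equiv track=rewrite | github.com/PhilippeCarphin/tests | Python_tests/argparse_and_config_file/github.py | process_defaults
-- ===== SOURCE A (Python) =====
-- def process_defaults(defaults):
--     """ Optional part: Allow keys matching command line argument names
--     as well as the version with '-' replaced by '_'.
--
--     Note: We don't know what the arguments will be.  This function just
--     changes keys k with k.replace('-', '_') and makes sure that both forms
--     of a key are not there."""
--     new_defaults = {}
--     for k,v in defaults.items():
--         if '-' in k:
--             kk = k.replace('-', '_')
--             if kk in defaults:
--                 raise Exception("Cannot have '-' version and '_' of a key in the same file")
--             new_defaults[kk] = v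
--         else:
--             new_defaults[k] = v
--     return new_defaults
-- ===== SOURCE B (Python) =====
-- def process_defaults(defaults):
--     """Set-based rewrite: collect the '_'-normalised forms of all dashed keys
--     into a set, detect a collision as a non-empty intersection of that set
--     with the dict's key view (no per-key inner membership test), then build
--     the renamed dict in one unconditional comprehension."""
--     dashed = {k.replace('-', '_') for k in defaults if '-' in k}
--     if dashed & defaults.keys():
--         raise Exception("Cannot have '-' version and '_' of a key in the same file")
--     return {k.replace('-', '_'): v for k, v in defaults.items()}
-- ===== Notes on version B (the rewrite author's own statement) =====
-- stated objective: alternative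
-- what changed: A makes one pass that branches per key and tests the renamed key's membership in defaults inline before each conditional insert; B instead materialises the set of '_'-normalised dashed keys, detects the collision as one set intersection with the key view, and then builds the result as a single unconditional rename comprehension.
import Mathlib
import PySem

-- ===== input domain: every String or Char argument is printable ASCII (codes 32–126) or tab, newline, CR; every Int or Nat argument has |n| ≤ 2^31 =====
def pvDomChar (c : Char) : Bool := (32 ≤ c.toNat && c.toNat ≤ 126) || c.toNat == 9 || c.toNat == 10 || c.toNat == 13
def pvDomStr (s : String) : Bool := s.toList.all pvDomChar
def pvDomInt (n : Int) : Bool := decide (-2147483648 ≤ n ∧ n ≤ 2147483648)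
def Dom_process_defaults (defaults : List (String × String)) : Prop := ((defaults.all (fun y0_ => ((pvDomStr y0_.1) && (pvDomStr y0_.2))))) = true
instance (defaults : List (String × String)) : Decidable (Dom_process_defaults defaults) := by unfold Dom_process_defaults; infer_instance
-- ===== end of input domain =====

-- B replaces A's per-key inline membership test by a set of normalised dashed keys
-- intersected once with the key view, then one unconditional rename pass (objective: alternative).

-- ===== PORT A =====
-- A's loop; 'none' is exactly where the Python raises the Exception (excluded by Pre_).
def pvLoopA (defaults : List (String × String)) : List (String × String) → PySem.Dict String String → Option (PySem.Dict String String)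
  | [], nd => some nd
  | (k, v) :: rest, nd =>
    if PySem.Str.isIn "-" k then
      let kk := PySem.Str.replace k "-" "_"
      if defaults.any (fun p => p.1 == kk) then none
      else pvLoopA defaults rest (nd.insert kk v)
    else pvLoopA defaults rest (nd.insert k v)

def process_defaults (defaults : List (String × String)) : List (String × String) :=
  ((pvLoopA defaults defaults PySem.Dict.empty).getD PySem.Dict.empty).items

-- ===== PORT B =====
def process_defaults_alt (defaults : List (String × String)) : List (String × String) :=
  -- dashed = {k.replace('-','_') for k in defaults if '-' in k}
  let dashed : PySem.Set String :=
    PySem.Set.ofList ((defaults.filter (fun p => PySem.Str.isIn "-" p.1)).map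
      (fun p => PySem.Str.replace p.1 "-" "_"))
  -- 'if dashed & defaults.keys(): raise' — the raise branch ([]) is excluded by Pre_
  if PySem.Set.isdisjoint dashed (defaults.map Prod.fst) then
    (defaults.foldl (fun d p => d.insert (PySem.Str.replace p.1 "-" "_") p.2)
      PySem.Dict.empty).items
  else []

-- ===== PRECONDITION & SPEC =====
-- Pre_ excludes exactly the inputs on which A (and B alike) raises the Exception:
-- some key contains '-' and its '_'-form is also a key.
def Pre_process_defaults (defaults : List (String × String)) : Prop :=
  (defaults.all (fun p =>
    !(PySem.Str.isIn "-" p.1 && defaults.any (fun q => q.1 == PySem.Str.replace p.1 "-" "_")))) = true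
instance (defaults : List (String × String)) : Decidable (Pre_process_defaults defaults) := by
  unfold Pre_process_defaults; infer_instance

def pvWitness_process_defaults : (List (String × String)) := [("a-b", "1"), ("c", "2")]

def Spec_process_defaults (defaults : List (String × String)) (out : List (String × String)) : Prop := out = process_defaults_alt defaults
instance (defaults : List (String × String)) (out : List (String × String)) : Decidable (Spec_process_defaults defaults out) := by unfold Spec_process_defaults; infer_instance

-- ===== CLAIM (what is proved, stated in full; the proofs are below) =====
def Claim_equal_process_defaults : Prop := ∀ (defaults : List (String × String)), Dom_process_defaults defaults → Pre_process_defaults defaults → Spec_process_defaults defaults (process_defaults defaults)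

-- ===== LEMMAS AND PROOFS =====

-- replace.go walks the string unchanged when the pattern never occurs
lemma pv_replace_go_id (l acc : List Char) (h : '-' ∉ l) :
    PySem.Chars.replace.go ['-'] ['_'] l.length l acc = acc.reverse ++ l := by
  induction l generalizing acc with
  | nil => simp [PySem.Chars.replace.go]
  | cons c t ih =>
      have hc : c ≠ '-' := fun hc => h (hc ▸ List.mem_cons_self)
      have hpre : List.isPrefixOf ['-'] (c :: t) = false := by
        simp [List.isPrefixOf]; exact fun hcc => (hc hcc.symm).elim
      simp only [List.length_cons, PySem.Chars.replace.go, hpre, Bool.false_eq_true, if_false]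
      rw [ih (c :: acc) (fun hm => h (List.mem_cons_of_mem _ hm))]
      simp

lemma pv_replace_id (k : String) (h : PySem.Str.isIn "-" k = false) :
    PySem.Str.replace k "-" "_" = k := by
  have hmem : '-' ∉ k.toList := by
    intro hm
    have : PySem.Chars.isIn ['-'] k.toList = false := h
    exact (PySem.Chars.isIn_eq_false_iff _ _).mp this ((List.singleton_infix_iff _ _).mpr hm)
  have : PySem.Chars.replace k.toList ['-'] ['_'] = k.toList := by
    simp only [PySem.Chars.replace, List.isEmpty_cons, Bool.false_eq_true, if_false]
    simpa using pv_replace_go_id k.toList [] hmem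
  apply String.toList_inj.mp
  simp [PySem.Str.replace, this]

-- the precondition, read per element
lemma pv_pre_elt (defaults : List (String × String)) (hpre : Pre_process_defaults defaults) :
    ∀ p ∈ defaults,
      (PySem.Str.isIn "-" p.1 && defaults.any (fun q => q.1 == PySem.Str.replace p.1 "-" "_")) = false := by
  intro p hp
  have := (List.all_eq_true.mp hpre) p hp
  cases hb : (PySem.Str.isIn "-" p.1 && defaults.any (fun q => q.1 == PySem.Str.replace p.1 "-" "_")) with
  | false => rfl
  | true => rw [hb] at this; exact absurd this (by decide)

-- under the precondition, A's loop never raises and equals B's unconditional fold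
lemma pv_loop_eq (defaults : List (String × String)) :
    ∀ (l : List (String × String)) (nd : PySem.Dict String String),
    (∀ p ∈ l, (PySem.Str.isIn "-" p.1 && defaults.any (fun q => q.1 == PySem.Str.replace p.1 "-" "_")) = false) →
    pvLoopA defaults l nd =
      some (l.foldl (fun d p => d.insert (PySem.Str.replace p.1 "-" "_") p.2) nd) := by
  intro l
  induction l with
  | nil => intro nd _; rfl
  | cons p t ih =>
      intro nd h
      obtain ⟨k, v⟩ := p
      have hp := h _ List.mem_cons_self
      have ht : ∀ q ∈ t, (PySem.Str.isIn "-" q.1 && defaults.any (fun r => r.1 == PySem.Str.replace q.1 "-" "_")) = false :=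
        fun q hq => h q (List.mem_cons_of_mem _ hq)
      by_cases hd : PySem.Str.isIn "-" k = true
      · have hany : defaults.any (fun q => q.1 == PySem.Str.replace k "-" "_") = false := by
          rw [hd, Bool.true_and] at hp; exact hp
        simp only [pvLoopA, hd, if_true, hany, Bool.false_eq_true, if_false]
        exact ih _ ht
      · have hd' : PySem.Str.isIn "-" k = false := by simpa using hd
        simp only [pvLoopA, hd', Bool.false_eq_true, if_false, List.foldl_cons]
        rw [pv_replace_id k hd']
        exact ih _ ht

-- under the precondition, B's set of normalised dashed keys misses every key
lemma pv_disjoint (defaults : List (String × String)) (hpre : Pre_process_defaults defaults) :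
    PySem.Set.isdisjoint
      (PySem.Set.ofList ((defaults.filter (fun p => PySem.Str.isIn "-" p.1)).map
        (fun p => PySem.Str.replace p.1 "-" "_")))
      (defaults.map Prod.fst) = true := by
  rw [PySem.Set.isdisjoint_iff]
  intro x hx hxk
  rw [PySem.Set.mem_ofList] at hx
  obtain ⟨p, hpmem, hpx⟩ := List.mem_map.mp hx
  have hpd := List.of_mem_filter hpmem
  have hp := pv_pre_elt defaults hpre p (List.mem_of_mem_filter hpmem)
  rw [hpd, Bool.true_and] at hp
  obtain ⟨q, hq, hqx⟩ := List.mem_map.mp hxk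
  have : defaults.any (fun q => q.1 == PySem.Str.replace p.1 "-" "_") = true :=
    List.any_eq_true.mpr ⟨q, hq, by rw [hqx, hpx]; exact beq_self_eq_true x⟩
  rw [hp] at this
  exact Bool.false_ne_true this

-- ===== VERDICT (by name: the statement is the Claim_ definition above) =====
theorem process_defaults_spec : Claim_equal_process_defaults := by
  intro defaults _ hpre
  unfold Spec_process_defaults process_defaults process_defaults_alt
  rw [pv_loop_eq defaults defaults PySem.Dict.empty (pv_pre_elt defaults hpre)]
  simp only [pv_disjoint defaults hpre, if_true, Option.getD_some]
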